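-- pv_equiv track=rewrite | github.com/gwYun/2023-April-coding-study | sehun/230418_불량사용자.py | solution
-- ===== SOURCE A (Python) =====
-- def solution(user_id, banned_id):
--     answer = set()
--
--     def 아이디찾기(아이디리스트, 밴아이디):
--         리스트 = []
--         for idx in range(len(아이디리스트)):
--             if len(아이디리스트[idx]) == len(밴아이디):
--                 flag=1
--                 for i in range(len(밴아이디)):
--                     if 밴아이디[i]=='*': continue # *일경우엔 문자비교 생략
--                     if 밴아이디[i] != 아이디리스트[idx][i]: flag=0 #문자 하나라도 틀리면 flag=0 갱신
--                 if flag: 리스트.append(idx)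
--         return 리스트
--
--
--     def 백트래킹(현재밴아이디, 선택된아이디):
--         if 현재밴아이디 == len(banned_id):
--             answer.add(tuple(sorted(선택된아이디)))
--             return
--
--         가능한아이디 = 아이디찾기(user_id, banned_id[현재밴아이디])
--
--         for 아이디 in 가능한아이디:
--             if 아이디 not in 선택된아이디:
--                 선택된아이디.add(아이디)
--                 백트래킹(현재밴아이디 + 1, 선택된아이디)
--                 선택된아이디.remove(아이디)
--
--     백트래킹(0, set())
--     return len(answer)
-- ===== SOURCE B (Python) =====
-- def solution(user_id, banned_id):
--     def matches(u, p):
--         return len(u) == len(p) and all(pc == '*' or pc == uc for pc, uc in zip(p, u))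
--
--     cands = [[i for i, u in enumerate(user_id) if matches(u, p)] for p in banned_id]
--     combos = [()]
--     for c in cands:
--         combos = [t + (i,) for t in combos for i in c]
--     seen = {frozenset(t) for t in combos if len(set(t)) == len(t)}
--     return len(seen)
-- ===== Notes on version B (the rewrite author's own statement) =====
-- stated objective: simpler
-- what changed: Replaces A's recursive DFS backtracking over a shared mutable selected-index set with a flat pipeline: precompute per-pattern candidate index lists, enumerate their cartesian product, filter tuples with repeated indices, and count distinct frozensets.
import Mathlib
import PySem

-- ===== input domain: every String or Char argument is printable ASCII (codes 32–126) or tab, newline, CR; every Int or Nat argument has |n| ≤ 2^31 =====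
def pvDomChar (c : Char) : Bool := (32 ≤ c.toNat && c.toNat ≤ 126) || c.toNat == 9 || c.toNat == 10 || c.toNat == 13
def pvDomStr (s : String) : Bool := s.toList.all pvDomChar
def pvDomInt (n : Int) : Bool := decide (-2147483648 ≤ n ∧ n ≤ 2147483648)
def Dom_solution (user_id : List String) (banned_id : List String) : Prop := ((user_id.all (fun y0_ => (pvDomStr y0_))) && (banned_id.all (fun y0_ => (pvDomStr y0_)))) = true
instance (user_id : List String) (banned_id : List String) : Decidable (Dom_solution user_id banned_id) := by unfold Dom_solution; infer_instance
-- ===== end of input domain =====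

-- B replaces A's recursive DFS with a shared mutable set by a flat product-and-filter
-- over precomputed per-pattern candidate lists (objective: simpler decomposition).

-- ===== PORT A =====
-- inner character loop of 아이디찾기 (flag computation), extracted as a named helper
def flagA (users : List String) (ban : String) (idx : Int) : Int :=
  (PySem.List.pyRange 0 ban.toList.length 1).foldl (fun f i =>
    if PySem.List.pyGetD ban.toList i ' ' == '*' then f
    else if PySem.List.pyGetD ban.toList i ' ' != PySem.List.pyGetD (PySem.List.pyGetD users idx "").toList i ' ' then 0
    else f) 1

-- 아이디찾기: indices of users whose id matches the banned pattern
def findA (users : List String) (ban : String) : List Int :=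
  (PySem.List.pyRange 0 users.length 1).foldl (fun acc idx =>
    if (PySem.List.pyGetD users idx "").toList.length == ban.toList.length then
      if flagA users ban idx != 0 then acc ++ [idx] else acc
    else acc) []

-- 백트래킹: structural recursion over the remaining banned patterns, carrying the
-- selected-index set and the answer set (Python's in-place add/remove becomes state passing)
def btA (users : List String) : List String → PySem.Set Int → PySem.Set (List Int) → PySem.Set (List Int)
  | [], sel, ans => PySem.Set.add ans (PySem.List.sorted sel (fun y => y) false)
  | ban :: rest, sel, ans =>
      (findA users ban).foldl (fun a idx =>
        if PySem.Set.contains sel idx then a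
        else btA users rest (PySem.Set.add sel idx) a) ans

def solution (user_id : List String) (banned_id : List String) : Int :=
  ((btA user_id banned_id PySem.Set.empty PySem.Set.empty).length : Int)

-- ===== PORT B =====
def matchB (u : String) (p : String) : Bool :=
  u.toList.length == p.toList.length &&
  (p.toList.zip u.toList).all (fun pc => pc.1 == '*' || pc.1 == pc.2)

def candB (users : List String) (p : String) : List Int :=
  ((PySem.List.enumerate users 0).filter (fun iu => matchB iu.2 p)).map (·.1)

def combosOf (cs : List (List Int)) : List (List Int) :=
  cs.foldl (fun ts c => ts.flatMap (fun t => c.map (fun i => t ++ [i]))) [[]]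

-- frozenset(t) of distinct ints is ported canonically as its sorted element list
-- (exact: frozensets are equal iff they hold the same elements)
def solution_alt (user_id : List String) (banned_id : List String) : Int :=
  let cands := banned_id.map (candB user_id)
  let seen : PySem.Set (List Int) := PySem.Set.ofList
    (((combosOf cands).filter (fun t => (PySem.Set.ofList t).length == t.length)).map
      (fun t => PySem.List.sorted t (fun y => y) false))
  (seen.length : Int)

-- ===== PRECONDITION & SPEC =====
def Spec_solution (user_id : List String) (banned_id : List String) (out : Int) : Prop := out = solution_alt user_id banned_id
instance (user_id : List String) (banned_id : List String) (out : Int) : Decidable (Spec_solution user_id banned_id out) := by unfold Spec_solution; infer_instance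

-- ===== CLAIM (what is proved, stated in full; the proofs are below) =====
def Claim_equal_solution : Prop := ∀ (user_id : List String) (banned_id : List String), Dom_solution user_id banned_id → Spec_solution user_id banned_id (solution user_id banned_id)

-- ===== LEMMAS AND PROOFS =====

-- membership in A's index-filter loop
theorem mem_findA_aux (q : Int → Bool) :
    ∀ (l : List Int) (acc : List Int) (x : Int),
      x ∈ l.foldl (fun a i => if q i then a ++ [i] else a) acc ↔ x ∈ acc ∨ (x ∈ l ∧ q x = true) := by
  intro l
  induction l with
  | nil => simp
  | cons i l ih =>
      intro acc x
      simp only [List.foldl_cons, ih, List.mem_cons]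
      by_cases h : q i = true <;> simp [h] <;> aesop

-- the flag loop returns nonzero iff every pattern position is '*' or matches
theorem flag_aux (ok : Int → Bool) :
    ∀ (l : List Int) (f : Int),
      l.foldl (fun f i => if ok i then f else 0) f ≠ 0 ↔ f ≠ 0 ∧ ∀ i ∈ l, ok i = true := by
  intro l
  induction l with
  | nil => simp
  | cons i l ih =>
      intro f
      simp only [List.foldl_cons]
      by_cases h : ok i = true <;> simp [h, ih] <;> aesop

-- A's per-index test equals B's zip-based match
theorem find_eq_cand (users : List String) (ban : String) (x : Int) :
    x ∈ findA users ban ↔ x ∈ candB users ban := by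
  have hchars : ∀ (a b : List Char), a.length = b.length →
      ((∀ i ∈ PySem.List.pyRange 0 (a.length : Int) 1,
          (PySem.List.pyGetD a i ' ' == '*' || PySem.List.pyGetD a i ' ' == PySem.List.pyGetD b i ' ') = true) ↔
        (a.zip b).all (fun pc => pc.1 == '*' || pc.1 == pc.2) = true) := by
    intro a b hl
    simp only [PySem.List.mem_pyRange_one, List.all_eq_true]
    constructor
    · intro h pc hpc
      obtain ⟨k, hk, hpc⟩ := List.mem_iff_getElem.mp hpc
      have hk' : k < a.length := by simp only [List.length_zip] at hk; omega
      have hh := h (k : Int) ⟨by positivity, by exact_mod_cast hk'⟩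
      rw [List.getElem_zip] at hpc
      subst hpc
      simpa [PySem.List.pyGetD_natCast, List.getElem?_eq_getElem hk',
        List.getElem?_eq_getElem (show k < b.length by omega)] using hh
    · intro h i hi
      obtain ⟨h0, hL⟩ := hi
      have hk' : i.toNat < a.length := by omega
      have hmem : (a.zip b)[i.toNat]'(by simp only [List.length_zip]; omega) ∈ a.zip b :=
        List.getElem_mem _
      have hh := h _ hmem
      rw [List.getElem_zip] at hh
      have hcast : i = (i.toNat : Int) := by omega
      have ga : PySem.List.pyGetD a i ' ' = a[i.toNat] := by
        conv_lhs => rw [hcast]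
        rw [PySem.List.pyGetD_natCast]
        simp [List.getElem?_eq_getElem hk']
      have gb : PySem.List.pyGetD b i ' ' = b[i.toNat] := by
        conv_lhs => rw [hcast]
        rw [PySem.List.pyGetD_natCast]
        simp [List.getElem?_eq_getElem (show i.toNat < b.length by omega)]
      rw [ga, gb]
      simpa using hh
  have hflag : ∀ (u : String) (idx : Int), PySem.List.pyGetD users idx "" = u →
      u.toList.length = ban.toList.length →
      ((flagA users ban idx != 0) = true ↔
        ((ban.toList.zip u.toList).all (fun pc => pc.1 == '*' || pc.1 == pc.2)) = true) := by
    intro u idx hidx hlen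
    have hfb : (fun (f : Int) i =>
        if PySem.List.pyGetD ban.toList i ' ' == '*' then f
        else if PySem.List.pyGetD ban.toList i ' ' != PySem.List.pyGetD (PySem.List.pyGetD users idx "").toList i ' ' then (0 : Int)
        else f) = (fun f i =>
        if (PySem.List.pyGetD ban.toList i ' ' == '*' ||
            PySem.List.pyGetD ban.toList i ' ' == PySem.List.pyGetD u.toList i ' ') then f else 0) := by
      funext f i
      rw [hidx]
      by_cases h1 : (PySem.List.pyGetD ban.toList i ' ' == '*') = true <;>
        by_cases h2 : (PySem.List.pyGetD ban.toList i ' ' == PySem.List.pyGetD u.toList i ' ') = true <;>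
        simp [h1, h2, bne]
    unfold flagA
    rw [hfb]
    simp only [bne_iff_ne]
    rw [flag_aux]
    simp only [ne_eq, one_ne_zero, not_false_eq_true, true_and]
    exact hchars ban.toList u.toList hlen.symm
  have hbody : (fun (acc : List Int) idx =>
      if (PySem.List.pyGetD users idx "").toList.length == ban.toList.length then
        if flagA users ban idx != 0 then acc ++ [idx] else acc
      else acc) = (fun acc idx =>
      if ((PySem.List.pyGetD users idx "").toList.length == ban.toList.length &&
          (flagA users ban idx != 0)) then acc ++ [idx] else acc) := by
    funext acc idx
    by_cases h1 : ((PySem.List.pyGetD users idx "").toList.length == ban.toList.length) = true <;>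
      by_cases h2 : (flagA users ban idx != 0) = true <;> simp [h1, h2]
  have hA : x ∈ findA users ban ↔ x ∈ PySem.List.pyRange 0 (users.length : Int) 1 ∧
      (((PySem.List.pyGetD users x "").toList.length == ban.toList.length &&
        (flagA users ban x != 0)) = true) := by
    unfold findA
    rw [hbody, mem_findA_aux]
    simp
  rw [hA]
  unfold candB
  simp only [List.mem_map, List.mem_filter, PySem.List.mem_enumerate_iff]
  constructor
  · rintro ⟨hr, hq⟩
    rw [PySem.List.mem_pyRange_one] at hr
    obtain ⟨h0, hL⟩ := hr
    have hk : x.toNat < users.length := by omega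
    have hx : x = (x.toNat : Int) := by omega
    have hg : PySem.List.pyGetD users x "" = users[x.toNat] := by
      conv_lhs => rw [hx]
      rw [PySem.List.pyGetD_natCast]
      simp [List.getElem?_eq_getElem hk]
    rw [hg] at hq
    simp only [Bool.and_eq_true] at hq
    obtain ⟨hlen, hfl⟩ := hq
    have hlen' : users[x.toNat].toList.length = ban.toList.length := by simpa using hlen
    refine ⟨((x.toNat : Int), users[x.toNat]), ⟨⟨x.toNat, hk, by simp⟩, ?_⟩, by simpa using hx.symm⟩
    show matchB users[x.toNat] ban = true
    unfold matchB
    simp only [Bool.and_eq_true]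
    refine ⟨by simpa using hlen, ?_⟩
    rw [← hflag users[x.toNat] x hg hlen']
    exact hfl
  · rintro ⟨⟨i, u⟩, ⟨⟨k, hk, heq⟩, hm⟩, hx1⟩
    simp only [Prod.mk.injEq] at heq
    obtain ⟨hi, hu⟩ := heq
    have hx1' : i = x := hx1
    subst hu
    have hx : x = (k : Int) := by omega
    subst hx
    have hg : PySem.List.pyGetD users (k : Int) "" = users[k] := by
      rw [PySem.List.pyGetD_natCast]
      simp [List.getElem?_eq_getElem hk]
    have hm' : matchB users[k] ban = true := hm
    unfold matchB at hm'
    simp only [Bool.and_eq_true] at hm'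
    obtain ⟨hlen, hall⟩ := hm'
    have hlen' : users[k].toList.length = ban.toList.length := by simpa using hlen
    refine ⟨by rw [PySem.List.mem_pyRange_one]; constructor <;> [positivity; exact_mod_cast hk], ?_⟩
    rw [hg]
    simp only [Bool.and_eq_true]
    exact ⟨by simpa using hlen, (hflag users[k] (k : Int) hg hlen').mpr hall⟩

-- generic membership lemma for the candidate fold inside 백트래킹
theorem mem_foldl_bt (cond : Int → Bool) (R : Int → PySem.Set (List Int) → PySem.Set (List Int))
    (P : Int → List Int → Prop)
    (hR : ∀ idx a x, x ∈ R idx a ↔ x ∈ a ∨ P idx x) :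
    ∀ (c : List Int) (ans : PySem.Set (List Int)) (x : List Int),
      x ∈ c.foldl (fun a idx => if cond idx then a else R idx a) ans ↔
        x ∈ ans ∨ ∃ idx ∈ c, cond idx = false ∧ P idx x := by
  intro c
  induction c with
  | nil => simp
  | cons i c ih =>
      intro ans x
      simp only [List.foldl_cons, ih, List.mem_cons]
      by_cases h : cond i = true <;> simp [h, hR] <;> aesop

theorem nodup_btA (users : List String) :
    ∀ (rest : List String) (sel : PySem.Set Int) (ans : PySem.Set (List Int)),
      ans.Nodup → (btA users rest sel ans).Nodup := by
  intro rest
  induction rest with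
  | nil =>
      intro sel ans h
      unfold btA
      unfold PySem.Set.add
      split
      · exact h
      · next hc =>
          refine List.Nodup.append h (List.nodup_singleton _) ?_
          intro y hy hz
          simp only [List.mem_singleton] at hz
          subst hz
          exact absurd ((PySem.Set.contains_iff _ _).mpr hy) (by simpa using hc)
  | cons ban rest ih =>
      intro sel ans h
      unfold btA
      generalize findA users ban = c
      induction c generalizing ans with
      | nil => exact h
      | cons i c ihc =>
          simp only [List.foldl_cons]
          apply ihc
          split
          · exact h
          · exact ih _ _ h

theorem mem_btA (users : List String) :
    ∀ (rest : List String) (sel : PySem.Set Int) (ans : PySem.Set (List Int)),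
      sel.Nodup → ∀ (x : List Int),
      x ∈ btA users rest sel ans ↔ x ∈ ans ∨
        ∃ t, List.Forall₂ (· ∈ ·) t (rest.map (findA users)) ∧ (sel ++ t).Nodup ∧
          x = PySem.List.sorted (sel ++ t) (fun y => y) false := by
  intro rest
  induction rest with
  | nil =>
      intro sel ans hsel x
      unfold btA
      rw [PySem.Set.mem_add]
      constructor
      · rintro (h | h)
        · exact Or.inl h
        · exact Or.inr ⟨[], List.Forall₂.nil, by simpa using hsel, by simpa using h⟩
      · rintro (h | ⟨t, hf, _, hx⟩)
        · exact Or.inl h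
        · cases hf
          exact Or.inr (by simpa using hx)
  | cons ban rest ih =>
      intro sel ans hsel x
      unfold btA
      rw [mem_foldl_bt (fun idx => PySem.Set.contains sel idx)
            (fun idx a => btA users rest (PySem.Set.add sel idx) a)
            (fun idx x => ∃ t, List.Forall₂ (· ∈ ·) t (rest.map (findA users)) ∧
              (PySem.Set.add sel idx ++ t).Nodup ∧
              x = PySem.List.sorted (PySem.Set.add sel idx ++ t) (fun y => y) false)
            (fun idx a x => ih (PySem.Set.add sel idx) a (PySem.Set.nodup_add sel idx hsel) x)]
      apply or_congr_right
      constructor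
      · rintro ⟨idx, hidx, hc, t, hf, hnd, hx⟩
        have hnotmem : idx ∉ sel := fun hm => by
          rw [(PySem.Set.contains_iff _ _).mpr hm] at hc; cases hc
        have hadd : PySem.Set.add sel idx = sel ++ [idx] := by
          unfold PySem.Set.add
          split
          · next hcc => rw [hcc] at hc; exact absurd hc (by decide)
          · rfl
        rw [hadd] at hnd hx
        refine ⟨idx :: t, List.Forall₂.cons hidx hf, ?_, ?_⟩
        · simpa [List.append_assoc] using hnd
        · rw [hx]
          simp [List.append_assoc]
      · rintro ⟨t, hf, hnd, hx⟩
        cases t with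
        | nil => cases hf
        | cons i t' =>
            cases hf with
            | cons hi hf =>
                have hnotmem : i ∉ sel := by
                  intro hm
                  exact List.disjoint_of_nodup_append hnd hm (by simp)
                have hc : PySem.Set.contains sel i = false := by
                  by_cases h : PySem.Set.contains sel i = true
                  · exact absurd ((PySem.Set.contains_iff _ _).mp h) hnotmem
                  · simpa using h
                have hadd : PySem.Set.add sel i = sel ++ [i] := by
                  unfold PySem.Set.add
                  split
                  · next hcc => rw [hcc] at hc; exact absurd hc (by decide)
                  · rfl
                refine ⟨i, hi, hc, t', hf, ?_, ?_⟩
                · rw [hadd]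
                  simpa [List.append_assoc] using hnd
                · rw [hadd, hx]
                  simp [List.append_assoc]

-- membership in B's product fold
theorem mem_combos_aux :
    ∀ (cs : List (List Int)) (ts : List (List Int)) (x : List Int),
      x ∈ cs.foldl (fun ts c => ts.flatMap (fun t => c.map (fun i => t ++ [i]))) ts ↔
        ∃ p t, p ∈ ts ∧ List.Forall₂ (· ∈ ·) t cs ∧ x = p ++ t := by
  intro cs
  induction cs with
  | nil => simp
  | cons c cs ih =>
      intro ts x
      simp only [List.foldl_cons, ih]
      constructor
      · rintro ⟨p, t, hp, hf, rfl⟩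
        simp only [List.mem_flatMap, List.mem_map] at hp
        rcases hp with ⟨p0, hp0, i, hi, rfl⟩
        exact ⟨p0, i :: t, hp0, List.Forall₂.cons hi hf, by simp⟩
      · rintro ⟨p, t, hp, hf, rfl⟩
        cases t with
        | nil => cases hf
        | cons i t' =>
          cases hf with
          | cons hi hf =>
            exact ⟨p ++ [i], t', by simp only [List.mem_flatMap, List.mem_map]; exact ⟨p, hp, i, hi, rfl⟩, hf, by simp⟩

theorem mem_combosOf (cs : List (List Int)) (x : List Int) :
    x ∈ combosOf cs ↔ List.Forall₂ (· ∈ ·) x cs := by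
  unfold combosOf
  rw [mem_combos_aux]
  constructor
  · rintro ⟨p, t, hp, hf, rfl⟩
    simp only [List.mem_singleton] at hp
    subst hp; simpa using hf
  · intro hf
    exact ⟨[], x, by simp, hf, by simp⟩

-- set(xs) is a sublist of xs, so len(set(t)) == len(t) iff t has no duplicates
theorem ofList_sublist {α : Type} [BEq α] [LawfulBEq α] (t : List α) : (PySem.Set.ofList t).Sublist t := by
  induction t using List.reverseRecOn with
  | nil => simp [PySem.Set.ofList]
  | append_singleton t x ih =>
      have h : PySem.Set.ofList (t ++ [x]) = PySem.Set.add (PySem.Set.ofList t) x := by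
        rw [PySem.Set.ofList_eq_foldl, PySem.Set.ofList_eq_foldl, List.foldl_append]
        rfl
      rw [h]
      unfold PySem.Set.add
      split
      · exact ih.trans (List.sublist_append_left t [x])
      · exact ih.append (List.Sublist.refl [x])

theorem ofList_len_iff_nodup {α : Type} [BEq α] [LawfulBEq α] (t : List α) :
    ((PySem.Set.ofList t).length == t.length) = true ↔ t.Nodup := by
  rw [beq_iff_eq]
  constructor
  · intro h
    have he : PySem.Set.ofList t = t := (ofList_sublist t).eq_of_length h
    rw [← he]
    exact PySem.Set.nodup_ofList t
  · intro h
    rw [PySem.Set.ofList_eq_self_of_nodup t h]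

theorem forall2_congr_cand (users : List String) :
    ∀ (banned : List String) (t : List Int),
      List.Forall₂ (· ∈ ·) t (banned.map (findA users)) ↔
      List.Forall₂ (· ∈ ·) t (banned.map (candB users)) := by
  intro banned
  induction banned with
  | nil => simp
  | cons b bs ih =>
      intro t
      cases t with
      | nil => constructor <;> (intro hf; cases hf)
      | cons i t' =>
          constructor <;> intro hf <;> cases hf with
          | cons h1 h2 =>
              first
              | exact List.Forall₂.cons ((find_eq_cand users b i).mp h1) ((ih t').mp h2)
              | exact List.Forall₂.cons ((find_eq_cand users b i).mpr h1) ((ih t').mpr h2)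

-- ===== VERDICT (by name: the statement is the Claim_ definition above) =====
theorem solution_spec : Claim_equal_solution := by
  intro users banned _hdom
  unfold Spec_solution solution solution_alt
  have hmemA : ∀ x, x ∈ btA users banned PySem.Set.empty PySem.Set.empty ↔
      ∃ t, List.Forall₂ (· ∈ ·) t (banned.map (findA users)) ∧ t.Nodup ∧
        x = PySem.List.sorted t (fun y => y) false := by
    intro x
    rw [mem_btA users banned PySem.Set.empty PySem.Set.empty (by simp [PySem.Set.empty]) x]
    simp [PySem.Set.empty]
  have hmemB : ∀ x, x ∈ PySem.Set.ofList
      ((((combosOf (banned.map (candB users))).filter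
          (fun t => (PySem.Set.ofList t).length == t.length)).map
        (fun t => PySem.List.sorted t (fun y => y) false))) ↔
      ∃ t, List.Forall₂ (· ∈ ·) t (banned.map (candB users)) ∧ t.Nodup ∧
        x = PySem.List.sorted t (fun y => y) false := by
    intro x
    rw [PySem.Set.mem_ofList]
    simp only [List.mem_map, List.mem_filter, mem_combosOf]
    constructor
    · rintro ⟨t, ⟨hf, hd⟩, rfl⟩
      exact ⟨t, hf, (ofList_len_iff_nodup t).mp hd, rfl⟩
    · rintro ⟨t, hf, hd, rfl⟩
      exact ⟨t, ⟨hf, (ofList_len_iff_nodup t).mpr hd⟩, rfl⟩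
  have hiff : ∀ x, x ∈ btA users banned PySem.Set.empty PySem.Set.empty ↔
      x ∈ PySem.Set.ofList
      ((((combosOf (banned.map (candB users))).filter
          (fun t => (PySem.Set.ofList t).length == t.length)).map
        (fun t => PySem.List.sorted t (fun y => y) false))) := by
    intro x
    rw [hmemA, hmemB]
    constructor <;> rintro ⟨t, hf, hd, rfl⟩
    · exact ⟨t, (forall2_congr_cand users banned t).mp hf, hd, rfl⟩
    · exact ⟨t, (forall2_congr_cand users banned t).mpr hf, hd, rfl⟩
  have hA : (btA users banned PySem.Set.empty PySem.Set.empty).Nodup :=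
    nodup_btA users banned PySem.Set.empty PySem.Set.empty (by simp [PySem.Set.empty])
  have hB : (PySem.Set.ofList
      ((((combosOf (banned.map (candB users))).filter
          (fun t => (PySem.Set.ofList t).length == t.length)).map
        (fun t => PySem.List.sorted t (fun y => y) false)))).Nodup :=
    PySem.Set.nodup_ofList _
  have hperm := (List.perm_ext_iff_of_nodup hA hB).mpr hiff
  simp only [hperm.length_eq]
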